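-- pv_equiv track=rewrite | github.com/henferch/TOP-JAM | common_tools/src/common_tools/MsgConverter.py | _buildStateIdList
-- ===== SOURCE A (Python) =====
-- def _buildStateIdList(metaList_):
--     n = len(metaList_)
--     i = 0
--     fIds = []
--     subIds = []
--     subList = []
--     while i < n:
--         c = metaList_[i]
--         if c == "*" :
--             i += 1
--             fIds.append(metaList_[i])
--             if i > 1 :
--                 subIds.append(subList)
--                 subList = []
--
--         else :
--             subList.append(c)
--         i += 1
--     subIds.append(subList)
--
--     return fIds, subIds
-- ===== SOURCE B (Python) =====
-- def _buildStateIdList(metaList_):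
--     n = len(metaList_)
--     stars = []
--     i = 0
--     while i < n:
--         if metaList_[i] == "*":
--             stars.append(i)
--             i += 2
--         else:
--             i += 1
--     fIds = [metaList_[s + 1] for s in stars]
--     if not stars:
--         return [], [list(metaList_)]
--     subIds = []
--     for k, s in enumerate(stars):
--         if s > 0:
--             start = 0 if k == 0 else stars[k - 1] + 2
--             subIds.append(metaList_[start:s])
--     subIds.append(metaList_[stars[-1] + 2:])
--     return fIds, subIds
-- ===== Notes on version B (the rewrite author's own statement) =====
-- stated objective: alternative
-- what changed: Replaces A's single stateful scan with a mutable current-sublist accumulator by a two-phase decomposition: first a skip-2 scan collecting only the delimiter positions, then frame IDs and sublists are produced from those positions via list comprehension and slicing.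
import Mathlib
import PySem

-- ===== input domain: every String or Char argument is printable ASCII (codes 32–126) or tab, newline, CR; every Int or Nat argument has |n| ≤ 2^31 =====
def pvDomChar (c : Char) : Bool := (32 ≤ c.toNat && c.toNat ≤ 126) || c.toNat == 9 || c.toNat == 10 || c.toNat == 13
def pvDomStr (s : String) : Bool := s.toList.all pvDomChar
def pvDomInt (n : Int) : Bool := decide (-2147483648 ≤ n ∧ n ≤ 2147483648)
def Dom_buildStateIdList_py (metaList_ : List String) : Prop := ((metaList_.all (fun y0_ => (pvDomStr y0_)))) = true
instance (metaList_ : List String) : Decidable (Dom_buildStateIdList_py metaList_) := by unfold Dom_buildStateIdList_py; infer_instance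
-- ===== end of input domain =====

-- B replaces A's single stateful scan (mutable subList accumulator) by a delimiter-position
-- scan followed by list slicing; same cost, different decomposition ("alternative").

-- ===== PORT A =====
-- the while-loop of A: state (i, fIds, subIds, subList); metaList_[i] after the '*' is the
-- frame id — Python raises IndexError when it is out of range, so Pre_ excludes that case
-- (here getD "" is the placeholder value on that excluded input).
def pvGoA (l : List String) (i : Nat) (fIds : List String)
    (subIds : List (List String)) (subList : List String) :
    List String × List (List String) :=
  if h : i < l.length then
    let c := l[i]
    if c = "*" then
      let j := i + 1
      let fIds' := fIds ++ [l.getD j ""]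
      if j > 1 then
        pvGoA l (j + 1) fIds' (subIds ++ [subList]) []
      else
        pvGoA l (j + 1) fIds' subIds subList
    else
      pvGoA l (i + 1) fIds subIds (subList ++ [c])
  else
    (fIds, subIds ++ [subList])
termination_by l.length - i

def buildStateIdList_py (metaList_ : List String) : List String × List (List String) :=
  pvGoA metaList_ 0 [] [] []

-- ===== PORT B =====
-- first loop of B: collect the delimiter positions, advancing by 2 past a '*' (skipping the
-- consumed frame id) and by 1 otherwise.
def pvStars (l : List String) (i : Nat) : List Nat :=
  if h : i < l.length then
    if l[i] = "*" then i :: pvStars l (i + 2) else pvStars l (i + 1)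
  else []
termination_by l.length - i

-- second loop of B: for each star s (with the segment start carried along, 0 first, then
-- previous star + 2), slice out metaList_[start:s] when s > 0; finally the tail slice.
def pvSegs (l : List String) (start : Nat) : List Nat → List (List String)
  | [] => [l.drop start]
  | s :: rest =>
      (if s > 0 then [(l.drop start).take (s - start)] else []) ++ pvSegs l (s + 2) rest

def buildStateIdList_py_alt (metaList_ : List String) : List String × List (List String) :=
  let stars := pvStars metaList_ 0
  -- metaList_[s+1]: Python raises IndexError when out of range (excluded by Pre_); getD "" placeholder
  let fIds := stars.map (fun s => metaList_.getD (s + 1) "")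
  match stars with
  | [] => ([], [metaList_])
  | _ :: _ => (fIds, pvSegs metaList_ 0 stars)

-- ===== PRECONDITION & SPEC =====
-- Pre_ excludes exactly the inputs on which Python A raises IndexError: those where the
-- scan meets a '*' delimiter as the last element, so there is no frame id after it.
-- (okMeta is regular-grammar membership: (non-star | '*' followed by any token)*.)
def okMeta : List String → Bool
  | [] => true
  | c :: rest =>
      if c = "*" then
        match rest with
        | [] => false
        | _ :: r => okMeta r
      else okMeta rest

def Pre_buildStateIdList_py (metaList_ : List String) : Prop := okMeta metaList_ = true
instance (metaList_ : List String) : Decidable (Pre_buildStateIdList_py metaList_) := by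
  unfold Pre_buildStateIdList_py; infer_instance

def pvWitness_buildStateIdList_py : List String := ["*", "f1", "a", "b", "*", "f2", "c"]

def Spec_buildStateIdList_py (metaList_ : List String) (out : List String × List (List String)) : Prop := out = buildStateIdList_py_alt metaList_
instance (metaList_ : List String) (out : List String × List (List String)) : Decidable (Spec_buildStateIdList_py metaList_ out) := by unfold Spec_buildStateIdList_py; infer_instance

-- ===== CLAIM (what is proved, stated in full; the proofs are below) =====
def Claim_equal_buildStateIdList_py : Prop := ∀ (metaList_ : List String), Dom_buildStateIdList_py metaList_ → Pre_buildStateIdList_py metaList_ → Spec_buildStateIdList_py metaList_ (buildStateIdList_py metaList_)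

-- ===== LEMMAS AND PROOFS =====

-- proof-side accumulator variant of pvSegs: the first open segment carries prefix acc
def pvSegsAcc (l : List String) (i : Nat) (st : List Nat) (acc : List String) :
    List (List String) :=
  match st with
  | [] => [acc ++ l.drop i]
  | s :: rest =>
      if s > 0 then (acc ++ (l.drop i).take (s - i)) :: pvSegsAcc l (s + 2) rest []
      else pvSegsAcc l (s + 2) rest acc

lemma pvSegsAcc_nil (l : List String) (i : Nat) (st : List Nat) :
    pvSegsAcc l i st [] = pvSegs l i st := by
  induction st generalizing i with
  | nil => rfl
  | cons s rest ih =>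
      simp only [pvSegsAcc, pvSegs]
      split <;> simp [ih]

lemma pvStars_ge (l : List String) : ∀ k i, l.length - i ≤ k → ∀ s ∈ pvStars l i, i ≤ s := by
  intro k
  induction k with
  | zero =>
      intro i hk s hs
      rw [pvStars] at hs
      rw [dif_neg (by omega)] at hs
      simp at hs
  | succ k ih =>
      intro i hk s hs
      rw [pvStars] at hs
      split at hs
      · split at hs
        · rcases List.mem_cons.1 hs with rfl | hs'
          · exact le_refl s
          · have := ih (i + 2) (by omega) s hs'; omega
        · have := ih (i + 1) (by omega) s hs; omega
      · simp at hs

-- shifting the scan start by one past a non-star element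
lemma pvSegsAcc_shift (l : List String) (i : Nat) (hi : i < l.length)
    (st : List Nat) (hge : ∀ s ∈ st, i + 1 ≤ s) (acc : List String) :
    pvSegsAcc l (i + 1) st (acc ++ [l[i]]) = pvSegsAcc l i st acc := by
  cases st with
  | nil =>
      simp only [pvSegsAcc]
      rw [List.drop_eq_getElem_cons hi]
      simp
  | cons s rest =>
      have hs : i + 1 ≤ s := hge s (List.mem_cons_self ..)
      simp only [pvSegsAcc]
      have hpos : s > 0 := by omega
      simp only [if_pos hpos]
      congr 1
      have hstep : s - i = (s - (i + 1)) + 1 := by omega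
      rw [List.drop_eq_getElem_cons hi, hstep, List.take_succ_cons, List.append_assoc,
        List.singleton_append]

-- main invariant: the A-loop from state (i, fIds, subIds, subList) produces exactly the
-- B-side decomposition of the remaining suffix
lemma pvGoA_eq (l : List String) : ∀ k i, l.length - i ≤ k →
    ∀ (fIds : List String) (subIds : List (List String)) (acc : List String),
    pvGoA l i fIds subIds acc =
      (fIds ++ (pvStars l i).map (fun s => l.getD (s + 1) ""),
       subIds ++ pvSegsAcc l i (pvStars l i) acc) := by
  intro k
  induction k with
  | zero =>
      intro i hk fIds subIds acc
      rw [pvGoA, pvStars, dif_neg (by omega), dif_neg (by omega)]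
      have : l.drop i = [] := List.drop_eq_nil_of_le (by omega)
      simp [pvSegsAcc, this]
  | succ k ih =>
      intro i hk fIds subIds acc
      rw [pvGoA, pvStars]
      split
      · rename_i h
        by_cases hc : l[i] = "*"
        · simp only [if_pos hc]
          by_cases hj : i + 1 > 1
          · simp only [if_pos hj]
            rw [ih (i + 2) (by omega)]
            have hpos : i > 0 := by omega
            simp [pvSegsAcc, hpos, List.append_assoc]
          · simp only [if_neg hj]
            rw [ih (i + 2) (by omega)]
            have hz : i = 0 := by omega
            subst hz
            simp [pvSegsAcc]
        · simp only [if_neg hc]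
          rw [ih (i + 1) (by omega)]
          rw [pvSegsAcc_shift l i h _ (fun s hs => pvStars_ge l (l.length - (i + 1)) (i + 1) (le_refl _) s hs) acc]
      · rename_i h
        have : l.drop i = [] := List.drop_eq_nil_of_le (by omega)
        simp [pvSegsAcc, this]

lemma ports_agree (l : List String) : buildStateIdList_py l = buildStateIdList_py_alt l := by
  unfold buildStateIdList_py buildStateIdList_py_alt
  rw [pvGoA_eq l (l.length - 0) 0 (le_refl _), pvSegsAcc_nil]
  cases hst : pvStars l 0 with
  | nil => simp [pvSegs]
  | cons s rest => simp

-- ===== VERDICT (by name: the statement is the Claim_ definition above) =====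
theorem buildStateIdList_py_spec : Claim_equal_buildStateIdList_py := by
  intro l _ _
  unfold Spec_buildStateIdList_py
  exact ports_agree l
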